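-- pv_equiv track=rewrite | github.com/thuva4/Algorithms | algorithms/strings/longest-palindromic-substring/python/longest_palindrome_subarray.py | longest_palindrome_subarray
-- ===== SOURCE A (Python) =====
-- def longest_palindrome_subarray(arr: list[int]) -> int:
--     n = len(arr)
--     if n == 0:
--         return 0
--
--     def expand(l, r):
--         while l >= 0 and r < n and arr[l] == arr[r]:
--             l -= 1
--             r += 1
--         return r - l - 1
--
--     max_len = 1
--     for i in range(n):
--         odd = expand(i, i)
--         even = expand(i, i + 1)
--         max_len = max(max_len, odd, even)
--
--     return max_len
-- ===== SOURCE B (Python) =====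
-- def longest_palindrome_subarray(arr: list[int]) -> int:
--     n = len(arr)
--     if n == 0:
--         return 0
--     best = 1
--     # prev2[l] / prev[l]: is arr[l : l + (length-2)] / arr[l : l + (length-1)] a palindrome?
--     prev2 = [True] * (n + 1)
--     prev = [True] * n
--     for length in range(2, n + 1):
--         cur = [arr[l] == arr[l + length - 1] and prev2[l + 1] for l in range(n - length + 1)]
--         if True in cur:
--             best = length
--         prev2 = prev
--         prev = cur
--     return best
-- ===== Notes on version B (the rewrite author's own statement) =====
-- stated objective: alternative
-- what changed: A expands palindromes outward around each of the 2n-1 centers with a while loop; B instead runs a length-by-length dynamic programming, computing for each slice length the boolean row 'arr[l:l+length] is a palindrome' from the row two lengths earlier, and records the last length whose row contains True.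
import Mathlib
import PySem

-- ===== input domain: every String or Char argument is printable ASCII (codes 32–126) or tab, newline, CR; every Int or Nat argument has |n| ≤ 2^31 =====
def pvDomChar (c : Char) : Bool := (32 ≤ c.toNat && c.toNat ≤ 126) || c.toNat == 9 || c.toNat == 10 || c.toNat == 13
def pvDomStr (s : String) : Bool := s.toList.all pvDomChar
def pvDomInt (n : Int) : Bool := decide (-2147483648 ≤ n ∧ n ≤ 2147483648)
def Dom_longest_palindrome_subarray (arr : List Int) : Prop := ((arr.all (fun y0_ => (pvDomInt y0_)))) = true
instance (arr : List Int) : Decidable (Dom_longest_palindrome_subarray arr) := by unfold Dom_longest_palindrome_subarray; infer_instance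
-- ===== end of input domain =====

-- B replaces A's around-each-center while-loop expansion by a length-by-length
-- dynamic programming over the palindromicity of all contiguous slices.

-- ===== PORT A =====
-- A's inner `expand(l, r)` while loop; the fuel only makes the recursion structural
-- (each surviving iteration requires r < n and increments r, so fuel `arr.length + 1`
-- is never exhausted on the calls A makes).
def expandA (arr : List Int) (n : Int) : Nat → Int → Int → Int
  | 0, l, r => r - l - 1
  | fuel + 1, l, r =>
    if 0 ≤ l ∧ r < n ∧ PySem.List.pyGet? arr l = PySem.List.pyGet? arr r then
      expandA arr n fuel (l - 1) (r + 1)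
    else
      r - l - 1

def longest_palindrome_subarray (arr : List Int) : Int :=
  if (arr.length : Int) = 0 then 0
  else
    (List.range arr.length).foldl
      (fun (max_len : Int) (i : Nat) =>
        let odd := expandA arr (arr.length : Int) (arr.length + 1) (i : Int) (i : Int)
        let even := expandA arr (arr.length : Int) (arr.length + 1) (i : Int) ((i : Int) + 1)
        max (max max_len odd) even)
      1

-- ===== PORT B =====
-- dynamic programming over slice lengths; `prev2[l+1]` / `arr[l]` are in range on every
-- evaluated index, so `pyGetD`'s default is never taken (exact for the Python).
def longest_palindrome_subarray_alt (arr : List Int) : Int :=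
  let n := arr.length
  if n = 0 then 0
  else
    (((List.range' 2 (n - 1)).foldl
      (fun (st : Int × List Bool × List Bool) (length : Nat) =>
        let cur := (List.range (n - length + 1)).map
          (fun (l : Nat) => (PySem.List.pyGetD arr (l : Int) 0
                       == PySem.List.pyGetD arr ((l : Int) + (length : Int) - 1) 0)
                    && PySem.List.pyGetD st.2.1 ((l : Int) + 1) true)
        (if cur.contains true then (length : Int) else st.1, st.2.2, cur))
      (1, List.replicate (n + 1) true, List.replicate n true)).1)

-- ===== PRECONDITION & SPEC =====
def Spec_longest_palindrome_subarray (arr : List Int) (out : Int) : Prop := out = longest_palindrome_subarray_alt arr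
instance (arr : List Int) (out : Int) : Decidable (Spec_longest_palindrome_subarray arr out) := by unfold Spec_longest_palindrome_subarray; infer_instance

-- ===== CLAIM (what is proved, stated in full; the proofs are below) =====
def Claim_equal_longest_palindrome_subarray : Prop := ∀ (arr : List Int), Dom_longest_palindrome_subarray arr → Spec_longest_palindrome_subarray arr (longest_palindrome_subarray arr)

-- ===== LEMMAS AND PROOFS =====

-- the contiguous slice of `arr` starting at `a` of length `m`
def segN (arr : List Int) (a m : Nat) : List Int := (arr.drop a).take m

-- `k` is the length of some nonempty palindromic contiguous slice of `arr`
def Good (arr : List Int) (k : Int) : Prop :=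
  ∃ a m : Nat, a + m ≤ arr.length ∧ 1 ≤ m ∧ (segN arr a m).reverse = segN arr a m ∧ k = (m : Int)

-- A's fold step, named
def astep (arr : List Int) (max_len : Int) (i : Nat) : Int :=
  max (max max_len (expandA arr (arr.length : Int) (arr.length + 1) (i : Int) (i : Int)))
      (expandA arr (arr.length : Int) (arr.length + 1) (i : Int) ((i : Int) + 1))

theorem A_eq (arr : List Int) (h : arr.length ≠ 0) :
    longest_palindrome_subarray arr = (List.range arr.length).foldl (astep arr) 1 := by
  unfold longest_palindrome_subarray
  rw [if_neg (by exact_mod_cast h)]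
  rfl

-- generic foldl machinery ---------------------------------------------------

theorem foldl_ge_init {α : Type} (f : Int → α → Int) (h : ∀ b x, b ≤ f b x) :
    ∀ (L : List α) (b : Int), b ≤ L.foldl f b := by
  intro L
  induction L with
  | nil => intro b; simp
  | cons x t ih => intro b; exact le_trans (h b x) (ih (f b x))

theorem le_foldl_of_mem {α : Type} (f : Int → α → Int) (h : ∀ b x, b ≤ f b x)
    (c : Int) (x : α) (hc : ∀ b, c ≤ f b x) :
    ∀ (L : List α) (b : Int), x ∈ L → c ≤ L.foldl f b := by
  intro L
  induction L with
  | nil => intro b hb; simp at hb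
  | cons y t ih =>
    intro b hb
    rcases List.mem_cons.mp hb with rfl | hmem
    · exact le_trans (hc b) (foldl_ge_init f h t (f b x))
    · exact ih (f b y) hmem

theorem foldl_invariant_mem {α : Type} (f : Int → α → Int) (P : Int → Prop)
    (L : List α) (hstep : ∀ b x, x ∈ L → P b → P (f b x)) :
    ∀ (b : Int), P b → P (L.foldl f b) := by
  induction L with
  | nil => intro b hb; simpa using hb
  | cons x t ih =>
    intro b hb
    exact ih (fun b y hy => hstep b y (List.mem_cons_of_mem x hy))
      (f b x) (hstep b x List.mem_cons_self hb)

-- small facts ---------------------------------------------------------------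

theorem rev_short (xs : List Int) (h : xs.length ≤ 1) : xs.reverse = xs := by
  match xs with
  | [] => rfl
  | [x] => rfl
  | x :: y :: t => simp at h

theorem astep_mono (arr : List Int) : ∀ b i, b ≤ astep arr b i := by
  intro b i; unfold astep; exact le_trans (le_max_left _ _) (le_max_left _ _)

theorem length_segN (arr : List Int) (a m : Nat) (h : a + m ≤ arr.length) :
    (segN arr a m).length = m := by
  simp [segN]
  omega

theorem getElem_segN (arr : List Int) (a m i : Nat) (h : a + m ≤ arr.length) (hi : i < m) :
    (segN arr a m)[i]'(by rw [length_segN arr a m h]; exact hi) = arr[a + i]'(by omega) := by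
  simp [segN]

theorem segN_extend (arr : List Int) (a m : Nat) (h : a + m + 2 ≤ arr.length) :
    segN arr a (m + 2)
      = arr[a]'(by omega) :: (segN arr (a + 1) m ++ [arr[a + m + 1]'(by omega)]) := by
  unfold segN
  rw [List.drop_eq_getElem_cons (by omega), List.take_succ_cons, List.take_add_one]
  congr 1
  have e : a + 1 + m = a + m + 1 := by omega
  rw [List.getElem?_drop, e, List.getElem?_eq_getElem (by omega)]
  rfl

theorem pal_extend (x y : Int) (mid : List Int) (hxy : x = y) (hmid : mid.reverse = mid) :
    (x :: (mid ++ [y])).reverse = x :: (mid ++ [y]) := by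
  subst hxy
  simp [hmid]

-- B-side characterisation ----------------------------------------------------

-- B's fold step, named (definitionally the port's lambda)
def bstepB (arr : List Int) (st : Int × List Bool × List Bool) (length : Nat) :
    Int × List Bool × List Bool :=
  let cur := (List.range (arr.length - length + 1)).map
    (fun (l : Nat) => (PySem.List.pyGetD arr (l : Int) 0
                 == PySem.List.pyGetD arr ((l : Int) + (length : Int) - 1) 0)
              && PySem.List.pyGetD st.2.1 ((l : Int) + 1) true)
  (if cur.contains true then (length : Int) else st.1, st.2.2, cur)

theorem B_eq (arr : List Int) (h : arr.length ≠ 0) :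
    longest_palindrome_subarray_alt arr
      = ((List.range' 2 (arr.length - 1)).foldl (bstepB arr)
          (1, List.replicate (arr.length + 1) true, List.replicate arr.length true)).1 := by
  unfold longest_palindrome_subarray_alt
  rw [if_neg h]
  rfl

-- the DP row for slice length k : one Bool per admissible start index
def rowB (arr : List Int) (k : Nat) : List Bool :=
  (List.range (arr.length - k + 1)).map
    (fun l => decide ((segN arr l k).reverse = segN arr l k))

-- the best answer using slice lengths ≤ L only
def bestUpTo (arr : List Int) : Nat → Int
  | 0 => 1
  | 1 => 1
  | L + 2 => if (rowB arr (L + 2)).contains true then ((L : Int) + 2) else bestUpTo arr (L + 1)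

theorem pal_decomp (arr : List Int) (l k : Nat) (h2 : 2 ≤ k) (hn : l + k ≤ arr.length) :
    ((segN arr l k).reverse = segN arr l k)
      ↔ (arr[l]'(by omega) = arr[l + k - 1]'(by omega)
          ∧ (segN arr (l + 1) (k - 2)).reverse = segN arr (l + 1) (k - 2)) := by
  have hk : k = (k - 2) + 2 := by omega
  have hext := segN_extend arr l (k - 2) (by omega)
  have e1 : l + (k - 2) + 1 = l + k - 1 := by omega
  simp only [e1] at hext
  rw [← hk] at hext
  rw [hext]
  constructor
  · intro hpal
    simp only [List.reverse_cons, List.reverse_append, List.cons_append, List.append_assoc] at hpal ⊢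
    obtain ⟨hxy, htail⟩ := List.cons.inj hpal
    refine ⟨hxy.symm, ?_⟩
    rw [hxy] at htail
    have htail' : (segN arr (l + 1) (k - 2)).reverse ++ [arr[l + k - 1]'(by omega)]
        = segN arr (l + 1) (k - 2) ++ [arr[l + k - 1]'(by omega)] := by
      simpa using htail
    exact List.append_cancel_right htail'
  · intro ⟨hxy, hmid⟩
    exact pal_extend _ _ _ hxy hmid

theorem rowB_contains (arr : List Int) (k : Nat) (hk : k ≤ arr.length) :
    (rowB arr k).contains true
      ↔ ∃ a : Nat, a + k ≤ arr.length ∧ (segN arr a k).reverse = segN arr a k := by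
  unfold rowB
  simp only [List.contains_eq_any_beq, List.any_map, List.any_eq_true, List.mem_range]
  constructor
  · intro ⟨a, ha, hdec⟩
    refine ⟨a, by omega, ?_⟩
    simpa using hdec
  · intro ⟨a, ha, hpal⟩
    exact ⟨a, by omega, by simpa using hpal⟩

theorem rowB_zero (arr : List Int) : rowB arr 0 = List.replicate (arr.length + 1) true := by
  refine (List.eq_replicate_iff.mpr ⟨?_, ?_⟩)
  · simp [rowB]
  · intro b hb
    obtain ⟨a, _, rfl⟩ := List.mem_map.mp hb
    simp [segN]

theorem rowB_one (arr : List Int) (h : arr.length ≠ 0) :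
    rowB arr 1 = List.replicate arr.length true := by
  refine (List.eq_replicate_iff.mpr ⟨?_, ?_⟩)
  · simp [rowB]
    omega
  · intro b hb
    obtain ⟨a, _, rfl⟩ := List.mem_map.mp hb
    simp only [decide_eq_true_eq]
    refine rev_short _ ?_
    simp [segN]

-- one DP step computes the next row
theorem row_step (arr : List Int) (k : Nat) (h2 : 2 ≤ k) (hk : k ≤ arr.length) :
    (List.range (arr.length - k + 1)).map
      (fun (l : Nat) => (PySem.List.pyGetD arr (l : Int) 0
                   == PySem.List.pyGetD arr ((l : Int) + (k : Int) - 1) 0)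
                && PySem.List.pyGetD (rowB arr (k - 2)) ((l : Int) + 1) true)
      = rowB arr k := by
  unfold rowB
  refine List.map_congr_left ?_
  intro l hl
  have hl' : l + k ≤ arr.length := by
    have := List.mem_range.mp hl
    omega
  have ei : ((l : Int) + (k : Int) - 1) = ((l + k - 1 : Nat) : Int) := by omega
  have ej : ((l : Int) + 1) = ((l + 1 : Nat) : Int) := by push_cast; ring
  rw [ei, ej, PySem.List.pyGetD_natCast, PySem.List.pyGetD_natCast, PySem.List.pyGetD_natCast]
  rw [List.getD_eq_getElem?_getD, List.getD_eq_getElem?_getD,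
      List.getElem?_eq_getElem (by omega), List.getElem?_eq_getElem (by omega)]
  rw [List.getD_eq_getElem?_getD, List.getElem?_map,
      List.getElem?_range (show l + 1 < arr.length - (k - 2) + 1 by omega)]
  rw [Bool.eq_iff_iff]
  simp only [Bool.and_eq_true, beq_iff_eq, decide_eq_true_eq, Option.map_some, Option.getD_some]
  exact (pal_decomp arr l k h2 hl').symm

-- the fold over lengths 2..c+1 computes bestUpTo and the last two rows
theorem fold_rows (arr : List Int) :
    ∀ c : Nat, c + 1 ≤ arr.length →
    (List.range' 2 c).foldl (bstepB arr) (1, rowB arr 0, rowB arr 1)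
      = (bestUpTo arr (c + 1), rowB arr c, rowB arr (c + 1)) := by
  intro c
  induction c with
  | zero => intro _; rfl
  | succ c ih =>
    intro hc
    have hstep : List.range' 2 (c + 1) = List.range' 2 c ++ [2 + c] := by
      simpa using List.range'_concat (step := 1) (s := 2) (n := c)
    rw [hstep, List.foldl_append, ih (by omega)]
    simp only [List.foldl_cons, List.foldl_nil]
    show bstepB arr (bestUpTo arr (c + 1), rowB arr c, rowB arr (c + 1)) (2 + c)
      = (bestUpTo arr (c + 2), rowB arr (c + 1), rowB arr (c + 2))
    unfold bstepB
    simp only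
    have e2 : 2 + c = c + 2 := by omega
    rw [e2]
    have hrow : (List.range (arr.length - (c + 2) + 1)).map
        (fun (l : Nat) => (PySem.List.pyGetD arr (l : Int) 0
                     == PySem.List.pyGetD arr ((l : Int) + ((c + 2 : Nat) : Int) - 1) 0)
                  && PySem.List.pyGetD (rowB arr c) ((l : Int) + 1) true)
        = rowB arr (c + 2) := by
      have := row_step arr (c + 2) (by omega) (by omega)
      simpa using this
    rw [hrow]
    have hbest : bestUpTo arr (c + 2)
        = if (rowB arr (c + 2)).contains true then ((c : Int) + 2) else bestUpTo arr (c + 1) := rfl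
    rw [hbest]
    rfl

theorem bestUpTo_ge_one (arr : List Int) : ∀ L, 1 ≤ bestUpTo arr L := by
  intro L
  induction L using Nat.strong_induction_on with
  | _ L ih =>
    match L with
    | 0 => exact le_refl _
    | 1 => exact le_refl _
    | L + 2 =>
      simp only [bestUpTo]
      split
      · omega
      · exact ih (L + 1) (by omega)

theorem bestUpTo_le (arr : List Int) : ∀ L, 1 ≤ L → bestUpTo arr L ≤ (L : Int) := by
  intro L
  induction L using Nat.strong_induction_on with
  | _ L ih =>
    match L with
    | 0 => intro h; exact absurd h (by omega)
    | 1 => intro _; exact le_refl _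
    | L + 2 =>
      intro _
      simp only [bestUpTo]
      split
      · push_cast; omega
      · exact le_trans (ih (L + 1) (by omega) (by omega)) (by push_cast; omega)

theorem bestUpTo_mono (arr : List Int) (L : Nat) :
    bestUpTo arr L ≤ bestUpTo arr (L + 1) := by
  match L with
  | 0 => exact le_refl _
  | L + 1 =>
    show bestUpTo arr (L + 1) ≤ bestUpTo arr (L + 2)
    simp only [bestUpTo]
    split
    · exact le_trans (bestUpTo_le arr (L + 1) (by omega)) (by push_cast; omega)
    · exact le_refl _

theorem bestUpTo_ge_row (arr : List Int) (m : Nat) (h2 : 2 ≤ m)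
    (hrow : (rowB arr m).contains true) :
    ∀ L, m ≤ L → (m : Int) ≤ bestUpTo arr L := by
  intro L
  induction L using Nat.strong_induction_on with
  | _ L ih =>
    intro hm
    match L, hm with
    | 0, hm => exact absurd hm (by omega)
    | 1, hm => exact absurd hm (by omega)
    | L + 2, hm =>
      rcases Nat.lt_or_ge m (L + 2) with hlt | hge
      · exact le_trans (ih (L + 1) (by omega) (by omega)) (bestUpTo_mono arr (L + 1))
      · have : m = L + 2 := by omega
        subst this
        simp only [bestUpTo, hrow, if_pos]
        push_cast; omega

theorem bestUpTo_good (arr : List Int) :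
    ∀ L, L ≤ arr.length → bestUpTo arr L = 1 ∨ Good arr (bestUpTo arr L) := by
  intro L
  induction L using Nat.strong_induction_on with
  | _ L ih =>
    intro hL
    match L with
    | 0 => exact Or.inl rfl
    | 1 => exact Or.inl rfl
    | L + 2 =>
      simp only [bestUpTo]
      split
      · next hrow =>
        right
        obtain ⟨a, ha, hpal⟩ := (rowB_contains arr (L + 2) hL).mp hrow
        exact ⟨a, L + 2, ha, by omega, hpal, by push_cast; ring⟩
      · exact ih (L + 1) (by omega) (by omega)

theorem Good_le_B (arr : List Int) (k : Int) (hg : Good arr k) :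
    k ≤ longest_palindrome_subarray_alt arr := by
  obtain ⟨a, m, hlen, hm, hpal, rfl⟩ := hg
  have hn : arr.length ≠ 0 := by omega
  rw [B_eq arr hn, ← rowB_zero arr, ← rowB_one arr hn,
      fold_rows arr (arr.length - 1) (by omega)]
  simp only
  have he : arr.length - 1 + 1 = arr.length := by omega
  rw [he]
  rcases Nat.lt_or_ge m 2 with hm2 | hm2
  · have : m = 1 := by omega
    subst this
    simpa using bestUpTo_ge_one arr arr.length
  · refine bestUpTo_ge_row arr m hm2 ?_ arr.length (by omega)
    refine (rowB_contains arr m (by omega)).mpr ⟨a, hlen, hpal⟩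

theorem B_good (arr : List Int) :
    longest_palindrome_subarray_alt arr = 0 ∨ Good arr (longest_palindrome_subarray_alt arr) := by
  by_cases hn : arr.length = 0
  · left
    unfold longest_palindrome_subarray_alt
    rw [if_pos hn]
  · rw [B_eq arr hn, ← rowB_zero arr, ← rowB_one arr hn,
        fold_rows arr (arr.length - 1) (by omega)]
    simp only
    have he : arr.length - 1 + 1 = arr.length := by omega
    rw [he]
    rcases bestUpTo_good arr arr.length (le_refl _) with h1 | hg
    · right
      rw [h1]
      refine ⟨0, 1, by omega, le_refl _, ?_, rfl⟩
      refine rev_short _ ?_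
      simp [segN]
    · exact Or.inr hg

theorem B_nonneg (arr : List Int) : 0 ≤ longest_palindrome_subarray_alt arr := by
  by_cases hn : arr.length = 0
  · unfold longest_palindrome_subarray_alt
    rw [if_pos hn]
  · rw [B_eq arr hn, ← rowB_zero arr, ← rowB_one arr hn,
        fold_rows arr (arr.length - 1) (by omega)]
    simp only
    exact le_trans (by omega) (bestUpTo_ge_one arr (arr.length - 1 + 1))

-- A-side: expand lemmas ------------------------------------------------------

theorem expand_ge_base (arr : List Int) (n : Int) :
    ∀ (fuel : Nat) (l r : Int), r - l - 1 ≤ expandA arr n fuel l r := by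
  intro fuel
  induction fuel with
  | zero => intro l r; simp [expandA]
  | succ f ih =>
    intro l r
    simp only [expandA]
    split
    · exact le_trans (by omega) (ih (l - 1) (r + 1))
    · exact le_refl _

theorem expand_ge_of_sym (arr : List Int) (n : Int) :
    ∀ (k fuel : Nat) (l r : Int), k ≤ fuel →
    (∀ j : Nat, j < k → 0 ≤ l - j ∧ r + j < n ∧
        PySem.List.pyGet? arr (l - j) = PySem.List.pyGet? arr (r + j)) →
    r - l - 1 + 2 * k ≤ expandA arr n fuel l r := by
  intro k
  induction k with
  | zero =>
    intro fuel l r _ _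
    simpa using expand_ge_base arr n fuel l r
  | succ k ih =>
    intro fuel l r hfuel hsym
    obtain ⟨f, rfl⟩ : ∃ f, fuel = f + 1 := ⟨fuel - 1, by omega⟩
    have h0 := hsym 0 (by omega)
    simp only [Nat.cast_zero, sub_zero, add_zero] at h0
    simp only [expandA, if_pos h0]
    have hrec := ih f (l - 1) (r + 1) (by omega) ?_
    · omega
    · intro j hj
      have hstep := hsym (j + 1) (by omega)
      push_cast at hstep ⊢
      refine ⟨by omega, by omega, ?_⟩
      have e1 : l - 1 - (j : Int) = l - ((j : Int) + 1) := by ring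
      have e2 : r + 1 + (j : Int) = r + ((j : Int) + 1) := by ring
      rw [e1, e2]
      exact hstep.2.2

-- expand's value, on A's own calls, is ≤ 0 or the length of a palindromic slice
theorem expand_result (arr : List Int) :
    ∀ (fuel : Nat) (l r : Int), -1 ≤ l → r ≤ (arr.length : Int) → l ≤ r →
    (l + 1 ≤ r → (segN arr (l + 1).toNat (r - l - 1).toNat).reverse
        = segN arr (l + 1).toNat (r - l - 1).toNat) →
    expandA arr (arr.length : Int) fuel l r ≤ 0 ∨
      Good arr (expandA arr (arr.length : Int) fuel l r) := by
  have ret : ∀ (l r : Int), -1 ≤ l → r ≤ (arr.length : Int) → l ≤ r →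
      (l + 1 ≤ r → (segN arr (l + 1).toNat (r - l - 1).toNat).reverse
          = segN arr (l + 1).toNat (r - l - 1).toNat) →
      r - l - 1 ≤ 0 ∨ Good arr (r - l - 1) := by
    intro l r h1 h2 h3 hpal
    by_cases hle : r - l - 1 ≤ 0
    · exact Or.inl hle
    · right
      refine ⟨(l + 1).toNat, (r - l - 1).toNat, by omega, by omega, hpal (by omega), by omega⟩
  intro fuel
  induction fuel with
  | zero =>
    intro l r h1 h2 h3 hpal
    exact ret l r h1 h2 h3 hpal
  | succ f ih =>
    intro l r h1 h2 h3 hpal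
    simp only [expandA]
    split
    · next hguard =>
      obtain ⟨hl0, hrn, heq⟩ := hguard
      refine ih (l - 1) (r + 1) (by omega) (by omega) (by omega) ?_
      intro _
      -- the new slice runs from l to r inclusive
      have e1 : (l - 1 + 1).toNat = l.toNat := by omega
      have e2 : (r + 1 - (l - 1) - 1).toNat = (r - l + 1).toNat := by omega
      rw [e1, e2]
      by_cases hlr : l < r
      case neg => -- l = r : the new slice is the singleton [arr[l]]
        have hrl : r = l := by omega
        subst hrl
        have e3 : (r - r + 1).toNat = 1 := by omega
        rw [e3]
        refine rev_short _ ?_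
        simp [segN]
      case pos => -- l < r : extend the old palindromic slice by arr[l] on the left, arr[r] on the right
        have hLlen : l.toNat < arr.length := by omega
        have hRlen : r.toNat < arr.length := by omega
        have hx : arr[l.toNat] = arr[r.toNat] := by
          rw [PySem.List.pyGet?_eq_some_getElem arr hl0 (by omega),
              PySem.List.pyGet?_eq_some_getElem arr (by omega) (by omega)] at heq
          exact Option.some.inj heq
        have hmid := hpal (by omega)
        have em : (r - l + 1).toNat = (r - l - 1).toNat + 2 := by omega
        rw [em]
        have hext := segN_extend arr l.toNat ((r - l - 1).toNat) (by omega)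
        have ea : l.toNat + 1 = (l + 1).toNat := by omega
        have eb : l.toNat + (r - l - 1).toNat + 1 = r.toNat := by omega
        simp only [ea, eb] at hext
        rw [hext]
        exact pal_extend _ _ _ hx hmid
    · exact ret l r h1 h2 h3 hpal

-- converting palindromicity of a slice into the pointwise symmetry expand needs
theorem pal_sym (arr : List Int) (a m : Nat) (h : a + m ≤ arr.length)
    (hpal : (segN arr a m).reverse = segN arr a m)
    (i j : Nat) (hi : i < m) (hj : j < m) (hij : i + j = m - 1) :
    PySem.List.pyGet? arr ((a + i : Nat) : Int) = PySem.List.pyGet? arr ((a + j : Nat) : Int) := by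
  have hlen := length_segN arr a m h
  have hgi : (segN arr a m)[i]'(by omega) = arr[a + i]'(by omega) := getElem_segN arr a m i h hi
  have hgj : (segN arr a m)[j]'(by omega) = arr[a + j]'(by omega) := getElem_segN arr a m j h hj
  have hq := congrArg (fun xs => xs[i]?) hpal
  simp only at hq
  rw [List.getElem?_reverse (by omega)] at hq
  have ej : (segN arr a m).length - 1 - i = j := by omega
  rw [ej] at hq
  have hsym : (segN arr a m)[j]'(by omega) = (segN arr a m)[i]'(by omega) := by
    have hj' := List.getElem?_eq_getElem (l := segN arr a m) (i := j) (by omega)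
    have hi' := List.getElem?_eq_getElem (l := segN arr a m) (i := i) (by omega)
    rw [hj', hi'] at hq
    exact Option.some.inj hq
  have : arr[a + i]'(by omega) = arr[a + j]'(by omega) := by
    rw [← hgi, ← hgj]; exact hsym.symm
  rw [PySem.List.pyGet?_natCast, PySem.List.pyGet?_natCast,
      List.getElem?_eq_getElem (by omega), List.getElem?_eq_getElem (by omega), this]

-- any palindromic slice length is ≤ A's answer (n ≥ 1)
theorem Good_le_A (arr : List Int) (hlen : arr.length ≠ 0) (k : Int) (hg : Good arr k) :
    k ≤ longest_palindrome_subarray arr := by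
  obtain ⟨a, m, hm_le, hm1, hpal, rfl⟩ := hg
  rw [A_eq arr hlen]
  rcases Nat.even_or_odd m with ⟨j, hj⟩ | ⟨j, hj⟩
  · -- m = 2j, j ≥ 1 : even-centred expansion at (a+j-1, a+j)
    have hj1 : 1 ≤ j := by omega
    set c : Nat := a + j - 1 with hc
    have hclen : c < arr.length := by omega
    have hexp : (m : Int) ≤ expandA arr (arr.length : Int) (arr.length + 1) (c : Int) ((c : Int) + 1) := by
      have := expand_ge_of_sym arr (arr.length : Int) j (arr.length + 1) (c : Int) ((c : Int) + 1)
        (by omega) ?_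
      · omega
      · intro t ht
        refine ⟨by omega, by omega, ?_⟩
        have e1 : (c : Int) - (t : Nat) = ((a + (j - 1 - t) : Nat) : Int) := by omega
        have e2 : (c : Int) + 1 + (t : Nat) = ((a + (j + t) : Nat) : Int) := by omega
        rw [e1, e2]
        exact pal_sym arr a m hm_le hpal (j - 1 - t) (j + t) (by omega) (by omega) (by omega)
    refine le_foldl_of_mem _ (astep_mono arr) _ c ?_ _ _ (List.mem_range.mpr hclen)
    intro b
    exact le_trans hexp (le_max_right _ _)
  · -- m = 2j+1 : odd-centred expansion at (a+j, a+j)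
    set c : Nat := a + j with hc
    have hclen : c < arr.length := by omega
    have hexp : (m : Int) ≤ expandA arr (arr.length : Int) (arr.length + 1) (c : Int) (c : Int) := by
      have := expand_ge_of_sym arr (arr.length : Int) (j + 1) (arr.length + 1) (c : Int) (c : Int)
        (by omega) ?_
      · omega
      · intro t ht
        refine ⟨by omega, by omega, ?_⟩
        have e1 : (c : Int) - (t : Nat) = ((a + (j - t) : Nat) : Int) := by omega
        have e2 : (c : Int) + (t : Nat) = ((a + (j + t) : Nat) : Int) := by omega
        rw [e1, e2]
        exact pal_sym arr a m hm_le hpal (j - t) (j + t) (by omega) (by omega) (by omega)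
    refine le_foldl_of_mem _ (astep_mono arr) _ c ?_ _ _ (List.mem_range.mpr hclen)
    intro b
    exact le_trans (le_trans hexp (le_max_right _ _)) (le_max_left _ _)

theorem A_ge_one (arr : List Int) (hlen : arr.length ≠ 0) :
    1 ≤ longest_palindrome_subarray arr := by
  rw [A_eq arr hlen]
  exact foldl_ge_init _ (astep_mono arr) _ 1

theorem A_le_B (arr : List Int) (hlen : arr.length ≠ 0) :
    longest_palindrome_subarray arr ≤ longest_palindrome_subarray_alt arr := by
  rw [A_eq arr hlen]
  have hB1 : (1 : Int) ≤ longest_palindrome_subarray_alt arr := by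
    refine Good_le_B arr 1 ⟨0, 1, by omega, le_refl _, ?_, rfl⟩
    refine rev_short _ ?_
    simp [segN]
  refine foldl_invariant_mem _ (fun b => b ≤ longest_palindrome_subarray_alt arr) _ ?_ _ hB1
  intro b i himem hb
  have hi : i < arr.length := List.mem_range.mp himem
  unfold astep
  have hodd := expand_result arr (arr.length + 1) (i : Int) (i : Int)
    (by omega) (by omega) (le_refl _) (fun h => absurd h (by omega))
  have heven := expand_result arr (arr.length + 1) (i : Int) ((i : Int) + 1)
    (by omega) (by omega) (by omega) ?_
  · refine max_le (max_le hb ?_) ?_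
    · rcases hodd with h | h
      · exact le_trans h (B_nonneg arr)
      · exact Good_le_B arr _ h
    · rcases heven with h | h
      · exact le_trans h (B_nonneg arr)
      · exact Good_le_B arr _ h
  · intro _
    have : ((i : Int) + 1 - (i : Int) - 1).toNat = 0 := by omega
    rw [this]
    rfl

-- ===== VERDICT (by name: the statement is the Claim_ definition above) =====
theorem longest_palindrome_subarray_spec : Claim_equal_longest_palindrome_subarray := by
  intro arr _
  unfold Spec_longest_palindrome_subarray
  by_cases hlen : arr.length = 0
  · have harr : arr = [] := List.length_eq_zero_iff.mp hlen
    subst harr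
    rfl
  · have hAB := A_le_B arr hlen
    have hBA : longest_palindrome_subarray_alt arr ≤ longest_palindrome_subarray arr := by
      rcases B_good arr with h0 | hg
      · rw [h0]; exact le_trans (by omega) (A_ge_one arr hlen)
      · exact Good_le_A arr hlen _ hg
    omega
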